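-- pv_equiv track=rewrite | github.com/jonathan512439/ParcialFinal_COMPILADORES | Pregunta_1.py | automata
-- ===== SOURCE A (Python) =====
-- def automata(input_string):
--     """
--    Pregunta 1. Inciso d)
--
--     param input_string: Cadena de entrada para evaluar.
--     return: True si la cadena es aceptada, False en caso contrario.
--     """
--     # Estado inicial
--     state = "q0"
--     for char in input_string:
--         if state == "q0":
--             if char == "m":
--                 state = "q1"
--             elif char == "h":
--                 state = "q2"
--             else:
--                 return False
--         elif state == "q1":
--             if char == "a":
--                 state = "q2"
--             elif char == "h":
--                 state = "q3"
--             else: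
--                 return False
--         elif state == "q2":
--             if char == "m":
--                 state = "q1"
--             else:
--                 return False
--         elif state == "q3":
--             if char == "a":
--                 state = "q3"
--             else:
--                 return False
--     return state in {"q2", "q3"}
-- ===== SOURCE B (Python) =====
-- def automata(input_string):
--     # Closed-form language check: accepted strings are exactly the nonempty
--     # strings of shape h?(ma)* or h?(ma)*mh a*  (derived from the DFA's regex).
--     t = input_string[1:] if input_string.startswith("h") else input_string
--     while t.startswith("ma"):
--         t = t[2:]
--     if not t:
--         return bool(input_string)
--     return t.startswith("mh") and all(c == "a" for c in t[2:])
-- ===== Notes on version B (the rewrite author's own statement) =====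
-- stated objective: alternative
-- what changed: Replaced the state-machine simulation by a closed-form pattern check of the accepted language: strip one optional leading h, greedily strip m-a pairs, then accept iff nothing remains and the input was nonempty, or the remainder is m followed by h followed only by a characters.
import Mathlib
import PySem

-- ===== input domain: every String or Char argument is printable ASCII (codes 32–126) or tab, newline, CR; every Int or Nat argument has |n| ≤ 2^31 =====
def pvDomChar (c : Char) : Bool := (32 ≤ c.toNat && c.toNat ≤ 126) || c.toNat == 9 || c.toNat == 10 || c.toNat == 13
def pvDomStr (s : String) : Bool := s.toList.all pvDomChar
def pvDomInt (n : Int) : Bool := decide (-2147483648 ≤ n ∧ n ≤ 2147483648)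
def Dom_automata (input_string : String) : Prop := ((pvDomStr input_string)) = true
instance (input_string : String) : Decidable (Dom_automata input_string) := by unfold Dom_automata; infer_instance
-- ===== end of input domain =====

-- B drops the DFA simulation: it recognises the same language by a closed-form
-- pattern decomposition (optional 'h', greedily stripped "ma" pairs, then
-- either nothing or "mh" followed by 'a's). Same return value on every input.

-- ===== PORT A =====
-- A's loop with early return: recursion over the characters carrying the state string.
def automataGo (state : String) (chars : List Char) : Bool :=
  match chars with
  | [] => state = "q2" ∨ state = "q3"
  | c :: cs =>
    if state = "q0" then
      if c = 'm' then automataGo "q1" cs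
      else if c = 'h' then automataGo "q2" cs
      else false
    else if state = "q1" then
      if c = 'a' then automataGo "q2" cs
      else if c = 'h' then automataGo "q3" cs
      else false
    else if state = "q2" then
      if c = 'm' then automataGo "q1" cs
      else false
    else if state = "q3" then
      if c = 'a' then automataGo "q3" cs
      else false
    else (state = "q2" ∨ state = "q3")

def automata (input_string : String) : Bool :=
  automataGo "q0" input_string.toList

-- ===== PORT B =====
-- while t.startswith("ma"): t = t[2:]
def stripMA (l : List Char) : List Char :=
  match l with
  | 'm' :: 'a' :: rest => stripMA rest
  | l => l

def altCore (l : List Char) : Bool :=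
  -- t = s[1:] if s.startswith("h") else s; then the while loop; then the final tests
  match stripMA (match l with | 'h' :: r => r | _ => l) with
  | [] => !l.isEmpty                                   -- if not t: return bool(input_string)
  | 'm' :: 'h' :: rest => rest.all (fun c => c = 'a')  -- t.startswith("mh") and all 'a'
  | _ => false

def automata_alt (input_string : String) : Bool :=
  altCore input_string.toList

-- ===== PRECONDITION & SPEC =====
def Spec_automata (input_string : String) (out : Bool) : Prop := out = automata_alt input_string
instance (input_string : String) (out : Bool) : Decidable (Spec_automata input_string out) := by unfold Spec_automata; infer_instance

-- ===== CLAIM (what is proved, stated in full; the proofs are below) =====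
def Claim_equal_automata : Prop := ∀ (input_string : String), Dom_automata input_string → Spec_automata input_string (automata input_string)

-- ===== LEMMAS AND PROOFS =====

-- value of B's final pattern check on the already-h-stripped remainder (proof-only helper)
def fB (cs : List Char) : Bool :=
  match stripMA cs with
  | [] => true
  | 'm' :: 'h' :: rest => rest.all (fun c => c = 'a')
  | _ => false

-- characterisation of A from state q1 (proof-only helper)
def gB (cs : List Char) : Bool :=
  match cs with
  | 'a' :: r => fB r
  | 'h' :: r => r.all (fun c => c = 'a')
  | _ => false

lemma stripMA_ma (r : List Char) : stripMA ('m'::'a'::r) = stripMA r := by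
  simp [stripMA]

lemma stripMA_stuck (c : Char) (r : List Char) (h : c ≠ 'm' ∨ r.head? ≠ some 'a') :
    stripMA (c :: r) = c :: r := by
  unfold stripMA
  split
  · next r' heq => simp_all
  · rfl

lemma headstrip_ne (c : Char) (r : List Char) (h : c ≠ 'h') :
    (match c :: r with | 'h' :: r => r | _ => c :: r) = c :: r := by
  split
  · next r' heq => simp_all
  · rfl

lemma q3_all (cs : List Char) : automataGo "q3" cs = cs.all (fun c => c = 'a') := by
  induction cs with
  | nil => rfl
  | cons c r ih =>
    by_cases h : c = 'a' <;> simp [automataGo, h, ih]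

-- fB at a stuck list, fully cased on the head
lemma fB_ma (r : List Char) : fB ('m'::'a'::r) = fB r := by
  unfold fB; rw [stripMA_ma]

lemma q2q1 : ∀ n cs, cs.length ≤ n →
    automataGo "q2" cs = fB cs ∧ automataGo "q1" cs = gB cs := by
  intro n
  induction n with
  | zero =>
    intro cs h
    have : cs = [] := List.eq_nil_of_length_eq_zero (Nat.le_zero.mp h)
    subst this; constructor <;> rfl
  | succ n ih =>
    intro cs h
    constructor
    · -- q2
      cases cs with
      | nil => rfl
      | cons c r =>
        have hr : r.length ≤ n := by simpa using Nat.le_of_succ_le_succ h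
        by_cases hm : c = 'm'
        · subst hm
          have hq1 : automataGo "q2" ('m' :: r) = automataGo "q1" r := by
            simp [automataGo]
          rw [hq1, (ih r hr).2]
          cases r with
          | nil => rfl
          | cons c2 r' =>
            by_cases ha : c2 = 'a'
            · subst ha; simp [gB, fB_ma]
            · by_cases hh : c2 = 'h'
              · subst hh
                have hs : stripMA ('m'::'h'::r') = 'm'::'h'::r' :=
                  stripMA_stuck _ _ (Or.inr (by simp))
                simp [gB, fB, hs]
              · have hs : stripMA ('m'::c2::r') = 'm'::c2::r' :=
                  stripMA_stuck _ _ (Or.inr (by simp [ha]))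
                simp [gB, fB, hs, ha, hh]
        · have hA : automataGo "q2" (c :: r) = false := by simp [automataGo, hm]
          have hs : stripMA (c :: r) = c :: r := stripMA_stuck _ _ (Or.inl hm)
          simp [hA, fB, hs, hm]
    · -- q1
      cases cs with
      | nil => rfl
      | cons c r =>
        have hr : r.length ≤ n := by simpa using Nat.le_of_succ_le_succ h
        by_cases ha : c = 'a'
        · subst ha
          have : automataGo "q1" ('a' :: r) = automataGo "q2" r := by simp [automataGo]
          rw [this, (ih r hr).1]; rfl
        · by_cases hh : c = 'h'
          · subst hh
            have : automataGo "q1" ('h' :: r) = automataGo "q3" r := by simp [automataGo]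
            rw [this, q3_all]; rfl
          · simp [automataGo, gB, ha, hh]

lemma q2_eq (cs : List Char) : automataGo "q2" cs = fB cs :=
  (q2q1 cs.length cs le_rfl).1

lemma q1_eq (cs : List Char) : automataGo "q1" cs = gB cs :=
  (q2q1 cs.length cs le_rfl).2

-- altCore on a nonempty list that does not start with 'h' is fB of the whole list
lemma altCore_ne_h (c : Char) (r : List Char) (hh : c ≠ 'h') :
    altCore (c :: r) = fB (c :: r) := by
  unfold altCore fB
  rw [headstrip_ne c r hh]
  cases stripMA (c :: r) with
  | nil => simp
  | cons c' r' => simp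

lemma altCore_h (r : List Char) : altCore ('h' :: r) = fB r := by
  unfold altCore fB
  cases hs : stripMA r with
  | nil => simp [hs]
  | cons c' r' => simp [hs]

lemma core_eq (l : List Char) : automataGo "q0" l = altCore l := by
  cases l with
  | nil => rfl
  | cons c r =>
    by_cases hh : c = 'h'
    · subst hh
      have : automataGo "q0" ('h' :: r) = automataGo "q2" r := by simp [automataGo]
      rw [this, q2_eq, altCore_h]
    · by_cases hm : c = 'm'
      · subst hm
        have h0 : automataGo "q0" ('m' :: r) = automataGo "q1" r := by simp [automataGo]
        rw [h0, q1_eq, altCore_ne_h _ _ hh]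
        cases r with
        | nil => rfl
        | cons c2 r' =>
          by_cases ha : c2 = 'a'
          · subst ha; simp [gB, fB_ma]
          · by_cases h2 : c2 = 'h'
            · subst h2
              have hs : stripMA ('m'::'h'::r') = 'm'::'h'::r' :=
                stripMA_stuck _ _ (Or.inr (by simp))
              simp [gB, fB, hs]
            · have hs : stripMA ('m'::c2::r') = 'm'::c2::r' :=
                stripMA_stuck _ _ (Or.inr (by simp [ha]))
              simp [gB, fB, hs, ha, h2]
      · have hA : automataGo "q0" (c :: r) = false := by simp [automataGo, hm, hh]
        have hs : stripMA (c :: r) = c :: r := stripMA_stuck _ _ (Or.inl hm)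
        rw [hA, altCore_ne_h _ _ hh]
        simp [fB, hs, hm]

-- ===== VERDICT (by name: the statement is the Claim_ definition above) =====
theorem automata_spec : Claim_equal_automata := by
  intro s _
  exact core_eq s.toList
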